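-- pv_equiv track=rewrite | github.com/d89012255/asr_demo1218 | predict_speech_file11.py | post_process_2
-- ===== SOURCE A (Python) =====
-- def post_process_2(input):
--     cancel = ["u","iao"]
--     delete = ["in","u"]
--     lock = ["uo","i"]
--
--     upload = ["an","ua"]
--
--     save = ["an","un"]
--     sure = ["ue","i"]
--
--     record = ["i","l","u"]
--     mix = [upload,save,delete,record, cancel,lock,sure,]
--     table= ["上傳","暫存","清除","紀錄","取消","鎖定","確定"]
--     all = ""
--
--     all = ""
--     for i in range(len(input)):
--         all+=(input[i][:-1]+" ")
--     temp_for_check = all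
--     for i in range(len(mix)):
--         temp_for_check = all
--         for b in range(len(mix[i])):
--
--             if(mix[i][b] in temp_for_check):
--                 temp_for_check = temp_for_check[temp_for_check.find(mix[i][b])+len(mix[i][b]):]
--
--                 if(b==len(mix[i])-1):
--                     return str(table[i])
--             else:
--                 break
--             continue
--     return "無法辨識"
-- ===== SOURCE B (Python) =====
-- def post_process_2(input):
--     text = "".join(s[:-1] + " " for s in input)
--
--     def matches(pats, s):
--         # ordered (non-overlapping) occurrence search by backtracking over positions
--         if not pats:
--             return True
--         p = pats[0]
--         return any(s[j:j + len(p)] == p and matches(pats[1:], s[j + len(p):])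
--                    for j in range(len(s) + 1))
--
--     commands = [(["an", "ua"], "上傳"), (["an", "un"], "暫存"), (["in", "u"], "清除"),
--                 (["i", "l", "u"], "紀錄"), (["u", "iao"], "取消"), (["uo", "i"], "鎖定"),
--                 (["ue", "i"], "確定")]
--     for pats, label in commands:
--         if matches(pats, text):
--             return label
--     return "無法辨識"
-- ===== Notes on version B (the rewrite author's own statement) =====
-- stated objective: alternative
-- what changed: B replaces A's greedy leftmost find-and-slice scan (with break/continue over index loops) by a declarative backtracking search that tests every position for each sub-pattern, and builds the text with a join over a generator instead of indexed string concatenation.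
import Mathlib
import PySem

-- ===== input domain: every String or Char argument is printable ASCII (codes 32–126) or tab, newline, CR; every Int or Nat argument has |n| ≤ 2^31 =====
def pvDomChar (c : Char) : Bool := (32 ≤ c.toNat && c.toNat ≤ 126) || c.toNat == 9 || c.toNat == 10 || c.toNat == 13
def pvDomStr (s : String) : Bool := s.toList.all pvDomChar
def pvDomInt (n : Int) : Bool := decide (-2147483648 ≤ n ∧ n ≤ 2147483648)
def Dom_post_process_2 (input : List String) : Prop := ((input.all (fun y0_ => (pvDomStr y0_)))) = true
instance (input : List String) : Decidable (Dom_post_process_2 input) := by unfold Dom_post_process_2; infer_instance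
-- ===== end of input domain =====

-- B replaces A's greedy leftmost find-and-slice scan by a backtracking search over all
-- positions for each sub-pattern; same return value everywhere (alternative, not faster).

-- ===== PORT A =====
-- inner loop of A: greedily consume each sub-pattern at its FIRST occurrence, cut, continue;
-- returns true exactly when the loop reaches b == len(mix[i])-1 and returns the label
def pvInnerA : List (List Char) → List Char → Bool
  | [], _ => false
  | p :: ps, temp =>
    if PySem.Chars.isIn p temp then
      let temp' := PySem.Chars.slice temp (some (PySem.Chars.find temp p + p.length)) none
      if ps = [] then true else pvInnerA ps temp'
    else false

-- outer loop of A over mix/table with early return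
def pvOuterA : List (List (List Char) × String) → List Char → String
  | [], _ => "無法辨識"
  | (pats, label) :: rest, all => if pvInnerA pats all then label else pvOuterA rest all

def post_process_2 (input : List String) : String :=
  let upload := [['a','n'], ['u','a']]
  let save   := [['a','n'], ['u','n']]
  let delete := [['i','n'], ['u']]
  let record := [['i'], ['l'], ['u']]
  let cancel := [['u'], ['i','a','o']]
  let lock   := [['u','o'], ['i']]
  let sure   := [['u','e'], ['i']]
  let mixTable : List (List (List Char) × String) :=
    [(upload, "上傳"), (save, "暫存"), (delete, "清除"), (record, "紀錄"),
     (cancel, "取消"), (lock, "鎖定"), (sure, "確定")]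
  -- all += input[i][:-1] + " "
  let all := input.foldl (fun acc s =>
    acc ++ (PySem.Str.slice s none (some (-1))).toList ++ [' ']) []
  pvOuterA mixTable all

-- ===== PORT B =====
-- matches(pats, s): backtracking — try every position j for the head pattern
def pvMatchB : List (List Char) → List Char → Bool
  | [], _ => true
  | p :: ps, s =>
    (List.range (s.length + 1)).any (fun j =>
      decide ((s.drop j).take p.length = p) && pvMatchB ps (s.drop (j + p.length)))

def pvScanB : List (List (List Char) × String) → List Char → String
  | [], _ => "無法辨識"
  | (pats, label) :: rest, text => if pvMatchB pats text then label else pvScanB rest text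

def post_process_2_alt (input : List String) : String :=
  let text := (input.map (fun s => s.toList.dropLast ++ [' '])).flatten
  let commands : List (List (List Char) × String) :=
    [([['a','n'], ['u','a']], "上傳"), ([['a','n'], ['u','n']], "暫存"),
     ([['i','n'], ['u']], "清除"), ([['i'], ['l'], ['u']], "紀錄"),
     ([['u'], ['i','a','o']], "取消"), ([['u','o'], ['i']], "鎖定"),
     ([['u','e'], ['i']], "確定")]
  pvScanB commands text

-- ===== PRECONDITION & SPEC =====
def Spec_post_process_2 (input : List String) (out : String) : Prop := out = post_process_2_alt input
instance (input : List String) (out : String) : Decidable (Spec_post_process_2 input out) := by unfold Spec_post_process_2; infer_instance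

-- ===== CLAIM (what is proved, stated in full; the proofs are below) =====
def Claim_equal_post_process_2 : Prop := ∀ (input : List String), Dom_post_process_2 input → Spec_post_process_2 input (post_process_2 input)

-- ===== LEMMAS AND PROOFS =====

-- drop at an index clamped to the length is the same drop
lemma drop_min_add (s : List Char) (n m : Nat) :
    s.drop (min n s.length + m) = s.drop (n + m) := by
  rcases le_total n s.length with h | h
  · rw [min_eq_left h]
  · rw [min_eq_right h, List.drop_eq_nil_of_le (by omega), List.drop_eq_nil_of_le (by omega)]

lemma drop_min (s : List Char) (n : Nat) : s.drop (min n s.length) = s.drop n := by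
  have h0 := drop_min_add s n 0
  simp only [Nat.add_zero] at h0
  exact h0

-- existence form of pvMatchB's head step
lemma matchB_cons_iff (p : List Char) (ps : List (List Char)) (s : List Char) :
    pvMatchB (p :: ps) s = true ↔
      ∃ j, j ≤ s.length ∧ p <+: s.drop j ∧ pvMatchB ps (s.drop (j + p.length)) = true := by
  simp only [pvMatchB, List.any_eq_true, List.mem_range, Bool.and_eq_true, decide_eq_true_eq,
    Nat.lt_succ_iff]
  constructor
  · rintro ⟨j, hj, hp, hm⟩
    exact ⟨j, hj, List.prefix_iff_eq_take.mpr hp.symm, hm⟩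
  · rintro ⟨j, hj, hp, hm⟩
    exact ⟨j, hj, (List.prefix_iff_eq_take.mp hp).symm, hm⟩

-- a successful backtracking match on a suffix also succeeds on the whole text
lemma matchB_mono (ps : List (List Char)) (s : List Char) (k : Nat)
    (h : pvMatchB ps (s.drop k) = true) : pvMatchB ps s = true := by
  cases ps with
  | nil => simp [pvMatchB]
  | cons p ps =>
    rw [matchB_cons_iff] at h ⊢
    obtain ⟨j, hj, hp, hm⟩ := h
    rw [List.drop_drop] at hp hm
    refine ⟨min (k + j) s.length, Nat.min_le_right _ _, ?_, ?_⟩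
    · rw [drop_min]; exact hp
    · rw [drop_min_add]
      have : k + j + p.length = k + (j + p.length) := by omega
      rw [this]; exact hm

-- greedy leftmost consumption equals backtracking existence (for a nonempty pattern list)
lemma inner_eq (ps : List (List Char)) : ∀ (p s : List Char),
    pvInnerA (p :: ps) s = pvMatchB (p :: ps) s := by
  induction ps with
  | nil =>
    intro p s
    by_cases h : PySem.Chars.isIn p s = true
    · obtain ⟨j, hp⟩ := (PySem.Chars.exists_prefix_drop_iff_isIn p s).mpr h
      have hb : pvMatchB [p] s = true := by
        rw [matchB_cons_iff]
        exact ⟨min j s.length, Nat.min_le_right _ _, by rw [drop_min]; exact hp,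
          by simp [pvMatchB]⟩
      simp [pvInnerA, h, hb]
    · have hb : pvMatchB [p] s = false := by
        rw [Bool.eq_false_iff]
        intro hc
        obtain ⟨j, _, hp, _⟩ := (matchB_cons_iff p [] s).mp hc
        exact h ((PySem.Chars.exists_prefix_drop_iff_isIn p s).mp ⟨j, hp⟩)
      simp [pvInnerA, h, hb]
  | cons q qs ih =>
    intro p s
    by_cases h : PySem.Chars.isIn p s = true
    · have hf0 : 0 ≤ PySem.Chars.find s p := by
        rw [PySem.Chars.find_nonneg_iff]
        exact (PySem.Chars.isIn_iff_infix p s).mp h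
      set f := (PySem.Chars.find s p).toNat with hfdef
      have hslice : PySem.Chars.slice s (some (PySem.Chars.find s p + ↑p.length)) none
          = s.drop (f + p.length) := by
        rw [PySem.Chars.slice_eq_listSlice, PySem.List.slice_from s (by omega)]
        congr 1
        omega
      have hA : pvInnerA (p :: q :: qs) s = pvMatchB (q :: qs) (s.drop (f + p.length)) := by
        simp only [pvInnerA, h, if_true]
        rw [hslice]
        exact ih q (s.drop (f + p.length))
      rw [hA]
      have hspec := PySem.Chars.find_spec (s := s) (sub := p) hf0
      rw [Bool.eq_iff_iff]
      constructor
      · intro hm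
        rw [matchB_cons_iff]
        refine ⟨f, ?_, hspec.1, hm⟩
        have := PySem.Chars.find_le_length s p
        omega
      · intro hm
        obtain ⟨j, hj, hp, hm'⟩ := (matchB_cons_iff p (q :: qs) s).mp hm
        have hfj : f ≤ j := by
          by_contra hlt
          exact hspec.2 j (by omega) hp
        apply matchB_mono _ _ (j - f)
        rw [List.drop_drop]
        have : f + p.length + (j - f) = j + p.length := by omega
        rw [this]; exact hm'
    · have hb : pvMatchB (p :: q :: qs) s = false := by
        rw [Bool.eq_false_iff]
        intro hc
        obtain ⟨j, _, hp, _⟩ := (matchB_cons_iff p (q :: qs) s).mp hc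
        exact h ((PySem.Chars.exists_prefix_drop_iff_isIn p s).mp ⟨j, hp⟩)
      simp [pvInnerA, h, hb]

lemma outer_eq (pairs : List (List (List Char) × String)) (s : List Char)
    (h : ∀ pr ∈ pairs, pr.1 ≠ []) : pvOuterA pairs s = pvScanB pairs s := by
  induction pairs with
  | nil => rfl
  | cons pr rest ih =>
    obtain ⟨pats, label⟩ := pr
    have hne : pats ≠ [] := h _ (List.mem_cons_self ..)
    cases pats with
    | nil => exact absurd rfl hne
    | cons p ps =>
      simp only [pvOuterA, pvScanB, inner_eq ps p s]
      split
      · rfl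
      · exact ih (fun pr hpr => h pr (List.mem_cons_of_mem _ hpr))

-- the two text builds agree
lemma text_eq (input : List String) :
    input.foldl (fun acc s => acc ++ (PySem.Str.slice s none (some (-1))).toList ++ [' ']) []
      = (input.map (fun s => s.toList.dropLast ++ [' '])).flatten := by
  simp only [List.append_assoc]
  rw [PySem.List.foldl_append_eq_flatMap
    (fun s => (PySem.Str.slice s none (some (-1))).toList ++ [' '])]
  simp only [List.nil_append, List.flatMap_def, PySem.Str.slice_to_neg_one]

-- ===== VERDICT (by name: the statement is the Claim_ definition above) =====
theorem post_process_2_spec : Claim_equal_post_process_2 := by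
  intro input _
  unfold Spec_post_process_2 post_process_2 post_process_2_alt
  rw [text_eq]
  exact outer_eq _ _ (by decide)
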